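-- pv_equiv track=rewrite | github.com/JacquePonce/backlog-tool | scripts/sources/jira.py | infer_front
-- ===== SOURCE A (Python) =====
-- def infer_front(labels: list[str]) -> str:
--     L = {x.lower() for x in (labels or [])}
--     if any("fraud" in x for x in L):
--         return "fraud"
--     if L & {"troy-cc-beta-tester", "troy-cc-staging-tests", "beta-testing"}:
--         return "beta_testing"
--     if L & {"troy-cc-beta", "troy-cc-alpha"}:
--         return "release_beta"
--     if L & {"sponsor-bank", "blocked-da", "destination-architecture", "da-task-force"}:
--         return "sponsor_lead_bank"
--     return "other"
-- ===== SOURCE B (Python) =====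
-- def infer_front(labels: list[str]) -> str:
--     cats = {
--         "troy-cc-beta-tester": 1, "troy-cc-staging-tests": 1, "beta-testing": 1,
--         "troy-cc-beta": 2, "troy-cc-alpha": 2,
--         "sponsor-bank": 3, "blocked-da": 3,
--         "destination-architecture": 3, "da-task-force": 3,
--     }
--     names = ["fraud", "beta_testing", "release_beta", "sponsor_lead_bank", "other"]
--     best = 4
--     for raw in labels or []:
--         x = raw.lower()
--         p = 0 if "fraud" in x else cats.get(x, 4)
--         if p < best:
--             best = p
--     return names[best]
-- ===== Notes on version B (the rewrite author's own statement) =====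
-- stated objective: simpler
-- what changed: Replaces the set construction plus four sequential set intersections with a single pass that maps each lowercased label to an integer priority (fraud substring=0, keyword dict lookup else 4), keeps the running minimum, and indexes the category name by that minimum.
import Mathlib
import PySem

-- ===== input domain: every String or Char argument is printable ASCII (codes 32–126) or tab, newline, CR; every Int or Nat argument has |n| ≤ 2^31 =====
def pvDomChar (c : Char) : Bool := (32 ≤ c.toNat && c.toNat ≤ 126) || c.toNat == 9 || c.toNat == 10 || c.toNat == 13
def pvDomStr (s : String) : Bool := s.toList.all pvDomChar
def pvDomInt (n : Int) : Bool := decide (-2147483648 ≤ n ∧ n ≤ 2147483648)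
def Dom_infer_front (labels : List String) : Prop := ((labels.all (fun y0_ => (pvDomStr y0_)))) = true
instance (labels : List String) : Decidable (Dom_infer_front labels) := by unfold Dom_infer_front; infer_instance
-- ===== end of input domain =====

-- B replaces A's set build + four sequential set intersections with a single
-- priority-minimising pass over the lowercased labels (objective: simpler).

-- ===== PORT A =====
def infer_front (labels : List String) : String :=
  let L : PySem.Set String := PySem.Set.ofList (labels.map PySem.Str.lower)
  if L.any (fun x => PySem.Str.isIn "fraud" x) then "fraud"
  else if !(PySem.Set.inter L ["troy-cc-beta-tester", "troy-cc-staging-tests", "beta-testing"]).isEmpty then "beta_testing"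
  else if !(PySem.Set.inter L ["troy-cc-beta", "troy-cc-alpha"]).isEmpty then "release_beta"
  else if !(PySem.Set.inter L ["sponsor-bank", "blocked-da", "destination-architecture", "da-task-force"]).isEmpty then "sponsor_lead_bank"
  else "other"

-- ===== PORT B =====
def pvCats : PySem.Dict String Nat := PySem.Dict.ofList
  [("troy-cc-beta-tester", 1), ("troy-cc-staging-tests", 1), ("beta-testing", 1),
   ("troy-cc-beta", 2), ("troy-cc-alpha", 2),
   ("sponsor-bank", 3), ("blocked-da", 3),
   ("destination-architecture", 3), ("da-task-force", 3)]

def pvNames : List String := ["fraud", "beta_testing", "release_beta", "sponsor_lead_bank", "other"]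

def pvPrio (x : String) : Nat :=
  if PySem.Str.isIn "fraud" x then 0 else PySem.Dict.getD pvCats x 4

def infer_front_alt (labels : List String) : String :=
  let best := labels.foldl (fun best raw =>
    let p := pvPrio (PySem.Str.lower raw)
    if p < best then p else best) 4
  -- names[best]: 0 ≤ best ≤ 4 always holds, so the index is in range
  PySem.List.pyGetD pvNames (best : Int) "other"

-- ===== PRECONDITION & SPEC =====
def Spec_infer_front (labels : List String) (out : String) : Prop := out = infer_front_alt labels
instance (labels : List String) (out : String) : Decidable (Spec_infer_front labels out) := by unfold Spec_infer_front; infer_instance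

-- ===== CLAIM (what is proved, stated in full; the proofs are below) =====
def Claim_equal_infer_front : Prop := ∀ (labels : List String), Dom_infer_front labels → Spec_infer_front labels (infer_front labels)

-- ===== LEMMAS AND PROOFS =====

-- B's running minimum, as a function (definitionally the fold inside infer_front_alt)
def pvBest (labels : List String) : Nat :=
  labels.foldl (fun best raw =>
    let p := pvPrio (PySem.Str.lower raw)
    if p < best then p else best) 4

theorem pvFold_le_init (l : List String) : ∀ (a : Nat),
    l.foldl (fun best raw =>
      let p := pvPrio (PySem.Str.lower raw)
      if p < best then p else best) a ≤ a := by
  induction l with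
  | nil => intro a; simp
  | cons x t ih =>
    intro a
    simp only [List.foldl_cons]
    exact le_trans (ih _) (by split <;> omega)

theorem pvFold_le_mem (l : List String) : ∀ (a : Nat) (x : String), x ∈ l →
    l.foldl (fun best raw =>
      let p := pvPrio (PySem.Str.lower raw)
      if p < best then p else best) a ≤ pvPrio (PySem.Str.lower x) := by
  induction l with
  | nil => intro a x hx; cases hx
  | cons y t ih =>
    intro a x hx
    simp only [List.foldl_cons]
    rcases List.mem_cons.mp hx with rfl | hx
    · refine le_trans (pvFold_le_init t _) ?_
      split <;> omega
    · exact ih _ x hx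

theorem pvFold_mem (l : List String) : ∀ (a : Nat),
    l.foldl (fun best raw =>
      let p := pvPrio (PySem.Str.lower raw)
      if p < best then p else best) a = a ∨
    ∃ x ∈ l, pvPrio (PySem.Str.lower x) =
      l.foldl (fun best raw =>
        let p := pvPrio (PySem.Str.lower raw)
        if p < best then p else best) a := by
  induction l with
  | nil => intro a; left; rfl
  | cons y t ih =>
    intro a
    simp only [List.foldl_cons]
    rcases ih (if pvPrio (PySem.Str.lower y) < a then pvPrio (PySem.Str.lower y) else a) with h | ⟨x, hx, hp⟩
    · by_cases hy : pvPrio (PySem.Str.lower y) < a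
      · right
        exact ⟨y, List.mem_cons_self, by rw [h]; simp [hy]⟩
      · left
        rw [h]; simp [hy]
    · right; exact ⟨x, List.mem_cons_of_mem _ hx, hp⟩

theorem pvBest_le_four (labels : List String) : pvBest labels ≤ 4 :=
  pvFold_le_init labels 4

theorem pvBest_le (labels : List String) (x : String) (hx : x ∈ labels) :
    pvBest labels ≤ pvPrio (PySem.Str.lower x) :=
  pvFold_le_mem labels 4 x hx

theorem pvBest_mem (labels : List String) :
    pvBest labels = 4 ∨ ∃ x ∈ labels, pvPrio (PySem.Str.lower x) = pvBest labels :=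
  pvFold_mem labels 4

-- the literal keyword dict, spelled out
theorem pvCats_eq_mk : pvCats = PySem.Dict.mk
    [("troy-cc-beta-tester", 1), ("troy-cc-staging-tests", 1), ("beta-testing", 1),
     ("troy-cc-beta", 2), ("troy-cc-alpha", 2),
     ("sponsor-bank", 3), ("blocked-da", 3),
     ("destination-architecture", 3), ("da-task-force", 3)] := by decide

theorem pvCats_getD_ne_zero (y : String) : PySem.Dict.getD pvCats y 4 ≠ 0 := by
  rw [pvCats_eq_mk]
  simp only [PySem.Dict.getD, PySem.Dict.get?_mk_cons]
  split_ifs <;> simp_all [PySem.Dict.get?, @eq_comm String]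

theorem pvCats_getD_eq_one (y : String) : PySem.Dict.getD pvCats y 4 = 1 ↔
    (y = "troy-cc-beta-tester" ∨ y = "troy-cc-staging-tests" ∨ y = "beta-testing") := by
  rw [pvCats_eq_mk]
  simp only [PySem.Dict.getD, PySem.Dict.get?_mk_cons]
  split_ifs <;> simp_all [PySem.Dict.get?, @eq_comm String]

theorem pvCats_getD_eq_two (y : String) : PySem.Dict.getD pvCats y 4 = 2 ↔
    (y = "troy-cc-beta" ∨ y = "troy-cc-alpha") := by
  rw [pvCats_eq_mk]
  simp only [PySem.Dict.getD, PySem.Dict.get?_mk_cons]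
  split_ifs <;> simp_all [PySem.Dict.get?, @eq_comm String]

theorem pvCats_getD_eq_three (y : String) : PySem.Dict.getD pvCats y 4 = 3 ↔
    (y = "sponsor-bank" ∨ y = "blocked-da" ∨ y = "destination-architecture" ∨ y = "da-task-force") := by
  rw [pvCats_eq_mk]
  simp only [PySem.Dict.getD, PySem.Dict.get?_mk_cons]
  split_ifs <;> simp_all [PySem.Dict.get?, @eq_comm String]

theorem pvPrio_eq_zero_iff (y : String) :
    pvPrio y = 0 ↔ PySem.Str.isIn "fraud" y = true := by
  unfold pvPrio
  split
  · simp_all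
  · simp_all [pvCats_getD_ne_zero y]

theorem pvPrio_eq_one_iff (y : String) :
    pvPrio y = 1 ↔ (y = "troy-cc-beta-tester" ∨ y = "troy-cc-staging-tests" ∨ y = "beta-testing") := by
  unfold pvPrio
  by_cases hf : PySem.Str.isIn "fraud" y = true
  · simp only [hf, if_true]
    constructor
    · omega
    · rintro (rfl | rfl | rfl) <;> exact absurd hf (by decide)
  · simp only [hf, if_false, Bool.false_eq_true]
    exact pvCats_getD_eq_one y

theorem pvPrio_eq_two_iff (y : String) :
    pvPrio y = 2 ↔ (y = "troy-cc-beta" ∨ y = "troy-cc-alpha") := by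
  unfold pvPrio
  by_cases hf : PySem.Str.isIn "fraud" y = true
  · simp only [hf, if_true]
    constructor
    · omega
    · rintro (rfl | rfl) <;> exact absurd hf (by decide)
  · simp only [hf, if_false, Bool.false_eq_true]
    exact pvCats_getD_eq_two y

theorem pvPrio_eq_three_iff (y : String) :
    pvPrio y = 3 ↔ (y = "sponsor-bank" ∨ y = "blocked-da" ∨ y = "destination-architecture" ∨ y = "da-task-force") := by
  unfold pvPrio
  by_cases hf : PySem.Str.isIn "fraud" y = true
  · simp only [hf, if_true]
    constructor
    · omega
    · rintro (rfl | rfl | rfl | rfl) <;> exact absurd hf (by decide)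
  · simp only [hf, if_false, Bool.false_eq_true]
    exact pvCats_getD_eq_three y

-- A's guards, characterised by B's priorities
theorem pvGuard0_iff (labels : List String) :
    ((PySem.Set.ofList (labels.map PySem.Str.lower)).any (fun x => PySem.Str.isIn "fraud" x) = true) ↔
    ∃ x ∈ labels, pvPrio (PySem.Str.lower x) = 0 := by
  rw [List.any_eq_true]
  constructor
  · rintro ⟨y, hy, hfy⟩
    rw [PySem.Set.mem_ofList] at hy
    obtain ⟨x, hx, rfl⟩ := List.mem_map.mp hy
    exact ⟨x, hx, (pvPrio_eq_zero_iff _).mpr hfy⟩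
  · rintro ⟨x, hx, hp⟩
    exact ⟨PySem.Str.lower x,
      (PySem.Set.mem_ofList _ _).mpr (List.mem_map.mpr ⟨x, hx, rfl⟩),
      (pvPrio_eq_zero_iff _).mp hp⟩

theorem pvInter_iff (M K : List String) :
    ((!(PySem.Set.inter (PySem.Set.ofList M) K).isEmpty) = true) ↔ ∃ y ∈ M, y ∈ K := by
  rw [Bool.not_eq_eq_eq_not, Bool.not_true, List.isEmpty_eq_false_iff_exists_mem]
  constructor
  · rintro ⟨y, hy⟩
    rw [PySem.Set.mem_inter] at hy
    exact ⟨y, (PySem.Set.mem_ofList _ _).mp hy.1, hy.2⟩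
  · rintro ⟨y, hM, hK⟩
    exact ⟨y, (PySem.Set.mem_inter _ _ _).mpr ⟨(PySem.Set.mem_ofList _ _).mpr hM, hK⟩⟩

theorem pvGuard1_iff (labels : List String) :
    ((!(PySem.Set.inter (PySem.Set.ofList (labels.map PySem.Str.lower))
        ["troy-cc-beta-tester", "troy-cc-staging-tests", "beta-testing"]).isEmpty) = true) ↔
    ∃ x ∈ labels, pvPrio (PySem.Str.lower x) = 1 := by
  rw [pvInter_iff]
  constructor
  · rintro ⟨y, hy, hk⟩
    obtain ⟨x, hx, rfl⟩ := List.mem_map.mp hy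
    refine ⟨x, hx, (pvPrio_eq_one_iff _).mpr ?_⟩
    simpa using hk
  · rintro ⟨x, hx, hp⟩
    refine ⟨PySem.Str.lower x, List.mem_map.mpr ⟨x, hx, rfl⟩, ?_⟩
    rcases (pvPrio_eq_one_iff _).mp hp with h | h | h <;> simp [h]

theorem pvGuard2_iff (labels : List String) :
    ((!(PySem.Set.inter (PySem.Set.ofList (labels.map PySem.Str.lower))
        ["troy-cc-beta", "troy-cc-alpha"]).isEmpty) = true) ↔
    ∃ x ∈ labels, pvPrio (PySem.Str.lower x) = 2 := by
  rw [pvInter_iff]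
  constructor
  · rintro ⟨y, hy, hk⟩
    obtain ⟨x, hx, rfl⟩ := List.mem_map.mp hy
    refine ⟨x, hx, (pvPrio_eq_two_iff _).mpr ?_⟩
    simpa using hk
  · rintro ⟨x, hx, hp⟩
    refine ⟨PySem.Str.lower x, List.mem_map.mpr ⟨x, hx, rfl⟩, ?_⟩
    rcases (pvPrio_eq_two_iff _).mp hp with h | h <;> simp [h]

theorem pvGuard3_iff (labels : List String) :
    ((!(PySem.Set.inter (PySem.Set.ofList (labels.map PySem.Str.lower))
        ["sponsor-bank", "blocked-da", "destination-architecture", "da-task-force"]).isEmpty) = true) ↔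
    ∃ x ∈ labels, pvPrio (PySem.Str.lower x) = 3 := by
  rw [pvInter_iff]
  constructor
  · rintro ⟨y, hy, hk⟩
    obtain ⟨x, hx, rfl⟩ := List.mem_map.mp hy
    refine ⟨x, hx, (pvPrio_eq_three_iff _).mpr ?_⟩
    simpa using hk
  · rintro ⟨x, hx, hp⟩
    refine ⟨PySem.Str.lower x, List.mem_map.mpr ⟨x, hx, rfl⟩, ?_⟩
    rcases (pvPrio_eq_three_iff _).mp hp with h | h | h | h <;> simp [h]

-- ===== VERDICT (by name: the statement is the Claim_ definition above) =====
theorem infer_front_spec : Claim_equal_infer_front := by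
  intro labels _
  show infer_front labels = PySem.List.pyGetD pvNames ((pvBest labels : Nat) : Int) "other"
  have h4 := pvBest_le_four labels
  have hle := pvBest_le labels
  have hmem := pvBest_mem labels
  have hv : pvBest labels = 0 ∨ pvBest labels = 1 ∨ pvBest labels = 2 ∨
      pvBest labels = 3 ∨ pvBest labels = 4 := by omega
  -- guard j is false whenever pvBest > j
  have hgf0 : pvBest labels > 0 →
      ((PySem.Set.ofList (labels.map PySem.Str.lower)).any (fun x => PySem.Str.isIn "fraud" x)) = false := by
    intro h
    rw [Bool.eq_false_iff, Ne, pvGuard0_iff]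
    rintro ⟨x, hx, hp⟩
    have := hle x hx; omega
  have hgf1 : pvBest labels > 1 →
      (!(PySem.Set.inter (PySem.Set.ofList (labels.map PySem.Str.lower))
        ["troy-cc-beta-tester", "troy-cc-staging-tests", "beta-testing"]).isEmpty) = false := by
    intro h
    rw [Bool.eq_false_iff, Ne, pvGuard1_iff]
    rintro ⟨x, hx, hp⟩
    have := hle x hx; omega
  have hgf2 : pvBest labels > 2 →
      (!(PySem.Set.inter (PySem.Set.ofList (labels.map PySem.Str.lower))
        ["troy-cc-beta", "troy-cc-alpha"]).isEmpty) = false := by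
    intro h
    rw [Bool.eq_false_iff, Ne, pvGuard2_iff]
    rintro ⟨x, hx, hp⟩
    have := hle x hx; omega
  have hgf3 : pvBest labels > 3 →
      (!(PySem.Set.inter (PySem.Set.ofList (labels.map PySem.Str.lower))
        ["sponsor-bank", "blocked-da", "destination-architecture", "da-task-force"]).isEmpty) = false := by
    intro h
    rw [Bool.eq_false_iff, Ne, pvGuard3_iff]
    rintro ⟨x, hx, hp⟩
    have := hle x hx; omega
  rcases hv with hv | hv | hv | hv | hv <;> rw [hv]
  · -- best = 0: the fraud guard fires
    rcases hmem with h | ⟨x, hx, hp⟩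
    · omega
    rw [hv] at hp
    have hg0 := (pvGuard0_iff labels).mpr ⟨x, hx, hp⟩
    simp only [infer_front]
    rw [if_pos hg0]
    decide
  · rcases hmem with h | ⟨x, hx, hp⟩
    · omega
    rw [hv] at hp
    have hg1 := (pvGuard1_iff labels).mpr ⟨x, hx, hp⟩
    simp only [infer_front]
    rw [if_neg (by simp only [hgf0 (by omega)]; decide), if_pos hg1]
    decide
  · rcases hmem with h | ⟨x, hx, hp⟩
    · omega
    rw [hv] at hp
    have hg2 := (pvGuard2_iff labels).mpr ⟨x, hx, hp⟩
    simp only [infer_front]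
    rw [if_neg (by simp only [hgf0 (by omega)]; decide), if_neg (by simp only [hgf1 (by omega)]; decide), if_pos hg2]
    decide
  · rcases hmem with h | ⟨x, hx, hp⟩
    · omega
    rw [hv] at hp
    have hg3 := (pvGuard3_iff labels).mpr ⟨x, hx, hp⟩
    simp only [infer_front]
    rw [if_neg (by simp only [hgf0 (by omega)]; decide), if_neg (by simp only [hgf1 (by omega)]; decide),
        if_neg (by simp only [hgf2 (by omega)]; decide), if_pos hg3]
    decide
  · simp only [infer_front]
    rw [if_neg (by simp only [hgf0 (by omega)]; decide), if_neg (by simp only [hgf1 (by omega)]; decide),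
        if_neg (by simp only [hgf2 (by omega)]; decide), if_neg (by simp only [hgf3 (by omega)]; decide)]
    decide
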